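-- pv_equiv track=rewrite | github.com/JunoCheon/BOJ | BOJ/sloved/Greedy/1339.py | tmp
-- ===== SOURCE A (Python) =====
-- def tmp(Words, i, j):
--     #i번째 인풋 ex)'ABC'
--     #j번째 알파벳 'A',...
--     l = len(Words[i])
--     output = []
--     for k in range(l):
--         if(Words[i][k]==j): output.append(l-1-k)
--     result = 0
--     for p in output:
--         result += pow(10,p)
--     return result
-- ===== SOURCE B (Python) =====
-- def tmp(Words, i, j):
--     # Horner-style single pass: no position list, no pow()
--     result = 0
--     for ch in Words[i]:
--         result = result * 10 + (1 if ch == j else 0)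
--     return result
-- ===== Notes on version B (the rewrite author's own statement) =====
-- stated objective: simpler
-- what changed: Replaces A's two-phase scheme (collect exponent positions into a list, then sum pow(10,p)) with a single Horner-style left-to-right pass accumulating result = result*10 + (1 if ch == j else 0), with no index arithmetic, no intermediate list and no pow call.
import Mathlib
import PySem

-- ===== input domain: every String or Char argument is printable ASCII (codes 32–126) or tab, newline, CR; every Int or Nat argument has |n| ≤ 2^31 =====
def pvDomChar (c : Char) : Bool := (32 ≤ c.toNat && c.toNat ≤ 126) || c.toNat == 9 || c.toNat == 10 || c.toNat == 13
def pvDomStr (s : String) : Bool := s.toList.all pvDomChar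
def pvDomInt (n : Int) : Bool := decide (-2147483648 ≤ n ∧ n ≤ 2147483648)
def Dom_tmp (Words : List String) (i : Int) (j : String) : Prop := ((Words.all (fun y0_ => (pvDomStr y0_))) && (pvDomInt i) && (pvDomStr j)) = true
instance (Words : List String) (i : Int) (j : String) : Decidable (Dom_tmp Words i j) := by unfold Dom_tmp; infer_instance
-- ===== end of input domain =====

-- B replaces A's collect-positions-then-sum-powers scheme with one Horner-style pass (simpler; same return value).

-- ===== PORT A =====
-- Words[i][k] == j : a one-character string compared with j
def tmp (Words : List String) (i : Int) (j : String) : Int :=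
  match PySem.List.pyGet? Words i with
  | none => 0   -- unreachable under Pre_tmp (Python raises IndexError)
  | some w =>
    let cs := w.toList
    let l := cs.length
    -- for k in range(l): if Words[i][k]==j: output.append(l-1-k)
    let output : List Int :=
      (PySem.List.pyRange 0 (l : Int) 1).foldl
        (fun acc k =>
          if j.toList = [PySem.List.pyGetD cs k ' '] then acc ++ [(l : Int) - 1 - k] else acc) []
    -- result = 0; for p in output: result += pow(10, p)  (every p here is ≥ 0, so 10^p.toNat is exact)
    output.foldl (fun r p => r + 10 ^ p.toNat) 0

-- ===== PORT B =====
def tmp_alt (Words : List String) (i : Int) (j : String) : Int :=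
  match PySem.List.pyGet? Words i with
  | none => 0   -- unreachable under Pre_tmp (Python raises IndexError)
  | some w =>
    -- result = 0; for ch in Words[i]: result = result*10 + (1 if ch == j else 0)
    w.toList.foldl (fun r c => r * 10 + (if j.toList = [c] then 1 else 0)) 0

-- ===== PRECONDITION & SPEC =====
-- Pre_tmp: i must be a valid (possibly negative) index into Words; otherwise Python's Words[i] raises IndexError.
def Pre_tmp (Words : List String) (i : Int) (j : String) : Prop :=
  PySem.Raise.InRange Words.length i
instance (Words : List String) (i : Int) (j : String) : Decidable (Pre_tmp Words i j) := by
  unfold Pre_tmp; infer_instance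

def pvWitness_tmp : List String × Int × String := (["ABC", "AB"], 0, "A")

def Spec_tmp (Words : List String) (i : Int) (j : String) (out : Int) : Prop := out = tmp_alt Words i j
instance (Words : List String) (i : Int) (j : String) (out : Int) : Decidable (Spec_tmp Words i j out) := by unfold Spec_tmp; infer_instance

-- ===== CLAIM (what is proved, stated in full; the proofs are below) =====
def Claim_equal_tmp : Prop := ∀ (Words : List String) (i : Int) (j : String), Dom_tmp Words i j → Pre_tmp Words i j → Spec_tmp Words i j (tmp Words i j)

-- ===== LEMMAS AND PROOFS =====

-- the core fact: A's "sum of 10^(l-1-k) over matching positions" equals B's Horner pass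
lemma pvMain (cs : List Char) (j : String) :
    ((((PySem.List.pyRange 0 (cs.length : Int) 1).filter
        (fun k => decide (j.toList = [PySem.List.pyGetD cs k ' ']))).map
        (fun k => ((10 : Int) ^ (((cs.length : Int) - 1 - k).toNat)))).sum)
      = cs.foldl (fun r c => r * 10 + (if j.toList = [c] then 1 else 0)) 0 := by
  induction cs using List.reverseRecOn with
  | nil => simp [PySem.List.pyRange]
  | append_singleton cs c ih =>
    have hlen : ((cs ++ [c]).length : Int) = (cs.length : Int) + 1 := by
      simp
    rw [hlen, PySem.List.pyRange_one_succ_right (by positivity)]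
    rw [List.filter_append, List.map_append, List.sum_append]
    have hfilter :
        (PySem.List.pyRange 0 (cs.length : Int) 1).filter
            (fun k => decide (j.toList = [PySem.List.pyGetD (cs ++ [c]) k ' '])) =
          (PySem.List.pyRange 0 (cs.length : Int) 1).filter
            (fun k => decide (j.toList = [PySem.List.pyGetD cs k ' '])) := by
      apply List.filter_congr
      intro k hk
      have hk' := PySem.List.mem_pyRange_one.mp hk
      have h0 : 0 ≤ k := hk'.1
      have hlt : k < (cs.length : Int) := hk'.2
      have : PySem.List.pyGetD (cs ++ [c]) k ' ' = PySem.List.pyGetD cs k ' ' := by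
        rw [PySem.List.pyGetD_eq_getElem (cs ++ [c]) ' ' h0 (by simp; omega),
            PySem.List.pyGetD_eq_getElem cs ' ' h0 (by exact_mod_cast hlt)]
        rw [List.getElem_append_left (by omega)]
      rw [this]
    rw [hfilter]
    have hmap :
        ((PySem.List.pyRange 0 (cs.length : Int) 1).filter
            (fun k => decide (j.toList = [PySem.List.pyGetD cs k ' ']))).map
            (fun k => ((10 : Int) ^ (((cs.length : Int) + 1 - 1 - k).toNat))) =
          ((PySem.List.pyRange 0 (cs.length : Int) 1).filter
            (fun k => decide (j.toList = [PySem.List.pyGetD cs k ' ']))).map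
            (fun k => 10 * ((10 : Int) ^ (((cs.length : Int) - 1 - k).toNat))) := by
      apply List.map_congr_left
      intro k hk
      have hk' := PySem.List.mem_pyRange_one.mp (List.mem_of_mem_filter hk)
      have he : ((cs.length : Int) + 1 - 1 - k).toNat = ((cs.length : Int) - 1 - k).toNat + 1 := by
        omega
      rw [he, pow_succ, mul_comm]
    rw [hmap, List.sum_map_mul_left, ih]
    -- the new last position: k = cs.length, exponent 0
    have hget : PySem.List.pyGetD (cs ++ [c]) (cs.length : Int) ' ' = c := by
      rw [PySem.List.pyGetD_eq_getElem (cs ++ [c]) ' ' (by positivity) (by simp)]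
      simp
    rw [List.foldl_append]
    simp only [List.foldl_cons, List.foldl_nil, List.filter_cons, List.filter_nil, hget]
    by_cases hc : j.toList = [c] <;> simp [hc] <;> ring

-- ===== VERDICT (by name: the statement is the Claim_ definition above) =====
theorem tmp_spec : Claim_equal_tmp := by
  intro Words i j _ hpre
  unfold Spec_tmp tmp tmp_alt
  cases hget : PySem.List.pyGet? Words i with
  | none =>
      exact absurd ((PySem.List.pyGet?_eq_none_iff Words i).mp hget) (not_not_intro hpre)
  | some w =>
      simp only []
      rw [show (fun (acc : List Int) (k : Int) =>
            if j.toList = [PySem.List.pyGetD w.toList k ' ']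
            then acc ++ [(w.toList.length : Int) - 1 - k] else acc) =
          (fun acc k =>
            if (fun k => decide (j.toList = [PySem.List.pyGetD w.toList k ' '])) k = true
            then acc ++ [(fun k => (w.toList.length : Int) - 1 - k) k] else acc) from by
        funext acc k; simp]
      rw [PySem.List.foldl_append_if]
      simp only [List.nil_append]
      rw [show (fun (r p : Int) => r + 10 ^ p.toNat) =
          (fun r p => r + (fun (p : Int) => (10 : Int) ^ p.toNat) p) from rfl]
      rw [PySem.List.foldl_add, List.map_map]
      simpa [Function.comp] using pvMain w.toList j
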